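-- pv_equiv track=rewrite | github.com/ymik0410/codility | triangle.py | solution
-- ===== SOURCE A (Python) =====
-- def solution(A):
--     # if there is a triangle, return 1
--     # else, return 0
--
--     A.sort()
--     i = 0
--     while i < len(A) and A[i] < 0:
--         i+=1
--     for p in range(i, len(A)-2):
--         for q in range(p+1, len(A)-1):
--             x = A[p]
--             y = A[q]
--             z = A[q+1]
--
--             if x+y > z:
--                 return 1
--     return 0
-- ===== SOURCE B (Python) =====
-- def solution(A):
--     # A sorted triple can only be a triangle if already a consecutive triple
--     # in sorted order works, so one linear scan over consecutive triples
--     # suffices (a negative smallest side can never win, so no skipping needed).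
--     # (Note: A sorts its argument in place; B does not mutate the argument.)
--     s = sorted(A)
--     return 1 if any(s[k] + s[k + 1] > s[k + 2] for k in range(len(s) - 2)) else 0
-- ===== Notes on version B (the rewrite author's own statement) =====
-- stated objective: simpler
-- what changed: Replaces the negative-skipping while loop plus nested p/q pair scan after the sort with a single linear pass over consecutive sorted triples s[k]+s[k+1]>s[k+2], which suffices because any winning pair implies a winning consecutive triple and a negative smallest side can never win.
import Mathlib
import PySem

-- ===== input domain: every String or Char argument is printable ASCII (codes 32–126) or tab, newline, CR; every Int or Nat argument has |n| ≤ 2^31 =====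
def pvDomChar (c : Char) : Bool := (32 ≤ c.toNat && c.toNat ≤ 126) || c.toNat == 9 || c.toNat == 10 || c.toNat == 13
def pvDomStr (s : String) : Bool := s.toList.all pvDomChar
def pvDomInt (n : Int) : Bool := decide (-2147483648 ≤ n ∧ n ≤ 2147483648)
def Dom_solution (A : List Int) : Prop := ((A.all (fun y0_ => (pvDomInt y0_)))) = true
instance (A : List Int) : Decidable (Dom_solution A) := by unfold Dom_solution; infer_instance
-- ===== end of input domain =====

-- B replaces A's nested pair scan (with a negative-skipping while loop) by one
-- simpler linear pass over consecutive sorted triples.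
-- A sorts its argument in place (observable mutation); B does not — the
-- equivalence proved here is about the return value.

-- ===== PORT A =====
-- the `while i < len(A) and A[i] < 0: i += 1` loop of A
def skipNeg (s : List Int) (i : Nat) : Nat :=
  if h : i < s.length ∧ PySem.List.pyGetD s (i : Int) 0 < 0 then
    skipNeg s (i + 1)
  else i
termination_by s.length - i
decreasing_by omega

def solution (A : List Int) : Int :=
  let s := PySem.List.sorted A (fun x => x) false   -- A.sort()
  let n : Int := s.length
  let i : Int := skipNeg s 0
  if (PySem.List.pyRange i (n - 2) 1).any (fun p =>
       (PySem.List.pyRange (p + 1) (n - 1) 1).any (fun q =>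
         let x := PySem.List.pyGetD s p 0
         let y := PySem.List.pyGetD s q 0
         let z := PySem.List.pyGetD s (q + 1) 0
         decide (x + y > z)))
  then 1 else 0

-- ===== PORT B =====
def solution_alt (A : List Int) : Int :=
  let s := PySem.List.sorted A (fun x => x) false
  if (PySem.List.pyRange 0 ((s.length : Int) - 2) 1).any (fun k =>
       decide (PySem.List.pyGetD s k 0 + PySem.List.pyGetD s (k + 1) 0 >
               PySem.List.pyGetD s (k + 2) 0))
  then 1 else 0

-- ===== PRECONDITION & SPEC =====
def Spec_solution (A : List Int) (out : Int) : Prop := out = solution_alt A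
instance (A : List Int) (out : Int) : Decidable (Spec_solution A out) := by unfold Spec_solution; infer_instance

-- ===== CLAIM (what is proved, stated in full; the proofs are below) =====
def Claim_equal_solution : Prop := ∀ (A : List Int), Dom_solution A → Spec_solution A (solution A)

-- ===== LEMMAS AND PROOFS =====

-- the while loop never runs past an index holding a nonnegative element
theorem skipNeg_le (s : List Int) (i k : Nat) (hik : i ≤ k) (hk : k < s.length)
    (hnn : 0 ≤ PySem.List.pyGetD s (k : Int) 0) : skipNeg s i ≤ k := by
  fun_induction skipNeg s i with
  | case1 i h ih =>
      rcases Nat.lt_or_ge i k with h' | h'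
      · exact ih (by omega)
      · have : i = k := by omega
        subst this; omega
  | case2 i h => exact hik

-- monotonicity of indexing into the sorted list
theorem gd_sorted_mono (A : List Int) (a b : Int) (ha : 0 ≤ a) (hab : a ≤ b)
    (hb : b < ((PySem.List.sorted A (fun x => x) false).length : Int)) :
    PySem.List.pyGetD (PySem.List.sorted A (fun x => x) false) a 0 ≤
    PySem.List.pyGetD (PySem.List.sorted A (fun x => x) false) b 0 := by
  rw [PySem.List.pyGetD_eq_getElem _ _ ha (by omega),
      PySem.List.pyGetD_eq_getElem _ _ (by omega) hb]
  exact PySem.List.sorted_id_getElem_mono A (by omega) (by omega)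

theorem any_eq (s : List Int)
    (hmono : ∀ a b : Int, 0 ≤ a → a ≤ b → b < (s.length : Int) →
       PySem.List.pyGetD s a 0 ≤ PySem.List.pyGetD s b 0) :
    ((PySem.List.pyRange ((skipNeg s 0 : Nat) : Int) ((s.length : Int) - 2) 1).any (fun p =>
       (PySem.List.pyRange (p + 1) ((s.length : Int) - 1) 1).any (fun q =>
         decide (PySem.List.pyGetD s p 0 + PySem.List.pyGetD s q 0 >
                 PySem.List.pyGetD s (q + 1) 0))))
    = ((PySem.List.pyRange 0 ((s.length : Int) - 2) 1).any (fun k =>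
         decide (PySem.List.pyGetD s k 0 + PySem.List.pyGetD s (k + 1) 0 >
                 PySem.List.pyGetD s (k + 2) 0))) := by
  rw [Bool.eq_iff_iff]
  simp only [List.any_eq_true, PySem.List.mem_pyRange_one, decide_eq_true_eq]
  constructor
  · rintro ⟨p, ⟨hip, hpn⟩, q, ⟨hpq, hqn⟩, hpq3⟩
    have hi0 : (0 : Int) ≤ (skipNeg s 0 : Nat) := by positivity
    refine ⟨q - 1, ⟨by omega, by omega⟩, ?_⟩
    have hmono' := hmono p (q - 1) (by omega) (by omega) (by omega)
    have h1 : q - 1 + 1 = q := by ring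
    have h2 : q - 1 + 2 = q + 1 := by ring
    rw [h1, h2]
    omega
  · rintro ⟨k, ⟨hk0, hkn⟩, hk3⟩
    -- s[k] is nonnegative (s[k] > s[k+2] - s[k+1] ≥ 0), so the while loop stopped at or before k
    have h12 := hmono (k + 1) (k + 2) (by omega) (by omega) (by omega)
    have hkk : 0 ≤ PySem.List.pyGetD s k 0 := by omega
    have hik : skipNeg s 0 ≤ k.toNat :=
      skipNeg_le s 0 k.toNat (by omega) (by omega)
        (by rwa [Int.toNat_of_nonneg hk0])
    have hikI : ((skipNeg s 0 : Nat) : Int) ≤ k := by omega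
    exact ⟨k, ⟨hikI, hkn⟩, k + 1, ⟨le_refl _, by omega⟩, by rw [show k + 1 + 1 = k + 2 by ring]; exact hk3⟩

-- ===== VERDICT (by name: the statement is the Claim_ definition above) =====
theorem solution_spec : Claim_equal_solution := by
  intro A _
  unfold Spec_solution solution solution_alt
  simp only [any_eq _ (gd_sorted_mono A)]
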